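-- pv_equiv track=rewrite | github.com/Yeungemy/python3 | milestone_projects/tic_tac_toe_game/tic_tac_toe_game_version_one.py | same_element_array_check
-- ===== SOURCE A (Python) =====
-- def same_element_array_check(game_board_row):
--     is_same = True
--     original_state_holder = '-'
--
--     if original_state_holder in game_board_row:
--         return False
--     else:
--         temp_item = game_board_row[len(game_board_row) - 1]
--         for party in game_board_row:
--             if is_same:
--                 is_same = (temp_item == party)
--
--             else:
--                 return is_same
--     return is_same
-- ===== SOURCE B (Python) =====
-- def same_element_array_check(game_board_row):
--     return all(a == b for a, b in zip(game_board_row, game_board_row[1:])) and game_board_row[0] != '-'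
-- ===== Notes on version B (the rewrite author's own statement) =====
-- stated objective: idiomatic
-- what changed: Replaces A's '-' membership scan plus compare-all-to-last loop by a single adjacent-pairs check (zip of the row with its tail) followed by one head-vs-'-' test, valid because a chain of adjacent equalities makes all elements equal so '-' can only occur as the head.
import Mathlib
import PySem

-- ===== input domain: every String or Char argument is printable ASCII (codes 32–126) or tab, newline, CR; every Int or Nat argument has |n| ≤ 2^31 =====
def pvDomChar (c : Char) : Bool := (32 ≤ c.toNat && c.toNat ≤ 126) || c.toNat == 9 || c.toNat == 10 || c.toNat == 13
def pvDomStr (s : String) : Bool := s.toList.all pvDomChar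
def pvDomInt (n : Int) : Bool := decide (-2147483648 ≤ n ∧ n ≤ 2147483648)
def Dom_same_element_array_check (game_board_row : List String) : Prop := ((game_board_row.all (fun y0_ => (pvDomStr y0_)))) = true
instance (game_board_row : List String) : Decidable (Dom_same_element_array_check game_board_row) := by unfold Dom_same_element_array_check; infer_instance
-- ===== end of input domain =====

-- B replaces A's membership scan + compare-to-last loop by an adjacent-pairs (zip-with-tail) check and a head-vs-'-' test (idiomatic rewrite, same cost).


-- ===== PORT A =====
-- 'for party in …' loop carrying is_same, with the early 'return is_same' once it is False
def sameLoopA (temp : String) : List String → Bool → Bool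
  | [], is_same => is_same
  | party :: rest, is_same =>
    if is_same then sameLoopA temp rest (temp == party) else is_same

def same_element_array_check (game_board_row : List String) : Bool :=
  if game_board_row.contains "-" then false
  else
    match PySem.List.pyGet? game_board_row (PySem.List.len game_board_row - 1) with
    | none => false   -- IndexError on the empty row; excluded by Pre_
    | some temp_item => sameLoopA temp_item game_board_row true

-- ===== PORT B =====
-- all(a == b for a, b in zip(row, row[1:])) and row[0] != '-'
def same_element_array_check_alt (game_board_row : List String) : Bool :=
  (game_board_row.zip (PySem.List.slice game_board_row (some 1) none)).all
      (fun p => p.1 == p.2) &&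
  (match PySem.List.pyGet? game_board_row 0 with
   | none => false   -- IndexError on the empty row; excluded by Pre_
   | some h => h != "-")

-- ===== PRECONDITION & SPEC =====
-- A (and B) raise IndexError indexing into an empty row: the empty list is excluded.
def Pre_same_element_array_check (game_board_row : List String) : Prop := game_board_row ≠ []
instance (game_board_row : List String) : Decidable (Pre_same_element_array_check game_board_row) := by unfold Pre_same_element_array_check; infer_instance
def pvWitness_same_element_array_check : List String := (["X", "X", "X"])

def Spec_same_element_array_check (game_board_row : List String) (out : Bool) : Prop := out = same_element_array_check_alt game_board_row
instance (game_board_row : List String) (out : Bool) : Decidable (Spec_same_element_array_check game_board_row out) := by unfold Spec_same_element_array_check; infer_instance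

-- ===== CLAIM (what is proved, stated in full; the proofs are below) =====
def Claim_equal_same_element_array_check : Prop := ∀ (game_board_row : List String), Dom_same_element_array_check game_board_row → Pre_same_element_array_check game_board_row → Spec_same_element_array_check game_board_row (same_element_array_check game_board_row)

-- ===== LEMMAS AND PROOFS =====
-- A's loop is 'all elements equal temp'
theorem sameLoopA_eq (temp : String) (l : List String) (s : Bool) :
    sameLoopA temp l s = (s && l.all (fun x => temp == x)) := by
  induction l generalizing s with
  | nil => cases s <;> simp [sameLoopA]
  | cons p rest ih =>
    cases s with
    | false => simp [sameLoopA]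
    | true => simp [sameLoopA, ih]

-- B's adjacent-pairs chain is 'all elements equal the head'
theorem chain_eq_all_head (h : String) (t : List String) :
    ((h :: t).zip t).all (fun p => p.1 == p.2) = t.all (fun x => h == x) := by
  induction t generalizing h with
  | nil => simp
  | cons a t ih =>
    simp only [List.zip_cons_cons, List.all_cons, ih a]
    by_cases hha : h = a
    · subst hha; rfl
    · rw [beq_eq_false_iff_ne.mpr hha, Bool.false_and, Bool.false_and]

theorem same_element_array_check_spec : Claim_equal_same_element_array_check := by
  intro l _ hpre
  unfold Spec_same_element_array_check
  obtain ⟨h, t, rfl⟩ := List.exists_cons_of_ne_nil hpre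
  unfold same_element_array_check same_element_array_check_alt
  have hne : h :: t ≠ [] := hpre
  rw [PySem.List.slice_from_one, List.tail_cons, chain_eq_all_head,
    PySem.List.pyGet?_zero, List.getElem?_cons_zero]
  have hA : PySem.List.pyGet? (h :: t) (PySem.List.len (h :: t) - 1) =
      (h :: t).getLast? := by
    rw [PySem.List.len_eq]
    have h2 : ((h :: t).length : Int) - 1 = (((h :: t).length - 1 : Nat) : Int) := by
      push_cast [List.length_cons]; omega
    rw [h2, PySem.List.pyGet?_natCast, List.getLast?_eq_getElem?]
  rw [hA, List.getLast?_eq_some_getLast hne]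
  dsimp only
  by_cases hall : t.all (fun x => h == x) = true
  · -- all elements equal the head: last = h, and '-' ∈ row ↔ h = "-"
    have hx : ∀ x ∈ t, x = h := by
      intro x hx
      have := List.all_eq_true.mp hall x hx
      exact (beq_iff_eq.mp this).symm
    have hlast : (h :: t).getLast hne = h := by
      have := List.getLast_mem hpre
      rcases List.mem_cons.mp this with h1 | h1
      · exact h1
      · exact hx _ h1
    rw [hlast, sameLoopA_eq]
    by_cases hdash : h = "-"
    · subst hdash
      simp [hall]
    · have hnc : (h :: t).contains "-" = false := by
        rw [List.contains_eq_mem]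
        apply decide_eq_false
        intro hmem
        rcases List.mem_cons.mp hmem with h1 | h1
        · exact hdash h1.symm
        · exact hdash (hx _ h1).symm
      have hbne : (h != "-") = true := bne_iff_ne.mpr hdash
      simp only [hnc, Bool.false_eq_true, if_false, List.all_cons, beq_self_eq_true,
        hall, Bool.and_true, hbne]
  · -- not a chain: B is false; A is false too (whether '-' occurs or not)
    have hf : t.all (fun x => h == x) = false := Bool.eq_false_iff.mpr hall
    rw [hf, Bool.false_and]
    split_ifs with hc
    · rfl
    · rw [sameLoopA_eq, Bool.true_and]
      by_contra hA
      have hA' : (h :: t).all (fun x => (h :: t).getLast hne == x) = true := by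
        cases hb : (h :: t).all (fun x => (h :: t).getLast hne == x)
        · exact absurd hb hA
        · rfl
      have hall' := List.all_eq_true.mp hA'
      have hh : (h :: t).getLast hne = h :=
        beq_iff_eq.mp (hall' h (List.mem_cons_self))
      apply hall
      refine List.all_eq_true.mpr (fun x hx => ?_)
      have := hall' x (List.mem_cons_of_mem _ hx)
      rw [hh] at this
      exact this
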